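-- pv_equiv track=rewrite | github.com/ahmadtc1/programmingPractice | cafeOrderChecker.py | serverOrdersRecursive
-- ===== SOURCE A (Python) =====
-- def serverOrdersRecursive(dineOrders, takeOutOrders, serverOrders):
--     if (len(serverOrders) == 0 ):
--         return True
--
--     elif (serverOrders[0] in dineOrders and len(dineOrders) > 0 and dineOrders[0] == serverOrders[0]):
--         return serverOrdersRecursive(dineOrders[1:], takeOutOrders, serverOrders[1:])
--
--     elif (serverOrders[0] in takeOutOrders and len(takeOutOrders) > 0 and takeOutOrders[0] == serverOrders[0]):
--         return serverOrdersRecursive(dineOrders, takeOutOrders[1:], serverOrders[1:])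
--
--     else:
--         return False
-- ===== SOURCE B (Python) =====
-- def serverOrdersRecursive(dineOrders, takeOutOrders, serverOrders):
--     i = j = 0
--     for x in serverOrders:
--         if i < len(dineOrders) and dineOrders[i] == x:
--             i += 1
--         elif j < len(takeOutOrders) and takeOutOrders[j] == x:
--             j += 1
--         else:
--             return False
--     return True
-- ===== Notes on version B (the rewrite author's own statement) =====
-- stated objective: faster
-- what changed: Replaced the recursive solution that slices both lists and does a linear membership scan at every step by a single iterative two-pointer pass over serverOrders (the membership test in A is redundant given the head comparison).
import Mathlib
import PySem

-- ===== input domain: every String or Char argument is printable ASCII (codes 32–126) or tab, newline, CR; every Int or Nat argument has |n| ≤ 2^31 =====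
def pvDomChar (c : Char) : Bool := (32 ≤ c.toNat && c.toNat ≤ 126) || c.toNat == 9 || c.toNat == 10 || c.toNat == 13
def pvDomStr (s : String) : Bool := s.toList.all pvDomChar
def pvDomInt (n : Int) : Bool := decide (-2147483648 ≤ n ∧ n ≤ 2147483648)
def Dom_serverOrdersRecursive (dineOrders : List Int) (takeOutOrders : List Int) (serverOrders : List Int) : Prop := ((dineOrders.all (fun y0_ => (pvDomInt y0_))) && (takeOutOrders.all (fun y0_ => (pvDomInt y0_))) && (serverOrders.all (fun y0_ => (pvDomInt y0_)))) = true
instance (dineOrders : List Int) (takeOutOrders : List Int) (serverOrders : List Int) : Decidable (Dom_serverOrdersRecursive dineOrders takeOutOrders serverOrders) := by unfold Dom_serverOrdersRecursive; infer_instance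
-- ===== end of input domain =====

-- B replaces A's O(n^2) slicing recursion with an O(n) two-pointer scan (A's membership test is redundant).


-- ===== PORT A =====
-- literal port of A: recursion on serverOrders, Python 'in' → List.contains, xs[1:] → drop 1
def serverOrdersRecursive (dineOrders : List Int) (takeOutOrders : List Int) (serverOrders : List Int) : Bool :=
  match serverOrders with
  | [] => true
  | x :: rest =>
    if dineOrders.contains x && decide (0 < dineOrders.length) && (dineOrders.head? == some x) then
      serverOrdersRecursive (dineOrders.drop 1) takeOutOrders rest
    else if takeOutOrders.contains x && decide (0 < takeOutOrders.length) && (takeOutOrders.head? == some x) then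
      serverOrdersRecursive dineOrders (takeOutOrders.drop 1) rest
    else
      false

-- ===== PORT B =====
-- the for-loop of Source B with indices i, j; 'i < len(d) and d[i] == x' is d[i]? == some x
def serverOrdersRecursiveAltGo (dineOrders : List Int) (takeOutOrders : List Int) : List Int → Nat → Nat → Bool
  | [], _, _ => true
  | x :: rest, i, j =>
    if dineOrders[i]? == some x then
      serverOrdersRecursiveAltGo dineOrders takeOutOrders rest (i + 1) j
    else if takeOutOrders[j]? == some x then
      serverOrdersRecursiveAltGo dineOrders takeOutOrders rest i (j + 1)
    else
      false

def serverOrdersRecursive_alt (dineOrders : List Int) (takeOutOrders : List Int) (serverOrders : List Int) : Bool :=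
  serverOrdersRecursiveAltGo dineOrders takeOutOrders serverOrders 0 0

-- ===== PRECONDITION & SPEC =====
def Spec_serverOrdersRecursive (dineOrders : List Int) (takeOutOrders : List Int) (serverOrders : List Int) (out : Bool) : Prop := out = serverOrdersRecursive_alt dineOrders takeOutOrders serverOrders
instance (dineOrders : List Int) (takeOutOrders : List Int) (serverOrders : List Int) (out : Bool) : Decidable (Spec_serverOrdersRecursive dineOrders takeOutOrders serverOrders out) := by unfold Spec_serverOrdersRecursive; infer_instance

-- ===== CLAIM (what is proved, stated in full; the proofs are below) =====
def Claim_equal_serverOrdersRecursive : Prop := ∀ (dineOrders : List Int) (takeOutOrders : List Int) (serverOrders : List Int), Dom_serverOrdersRecursive dineOrders takeOutOrders serverOrders → Spec_serverOrdersRecursive dineOrders takeOutOrders serverOrders (serverOrdersRecursive dineOrders takeOutOrders serverOrders)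

-- ===== LEMMAS AND PROOFS =====

-- A's branch condition collapses to the head comparison
theorem cond_eq_head (d : List Int) (x : Int) :
    (d.contains x && decide (0 < d.length) && (d.head? == some x)) = (d.head? == some x) := by
  cases d with
  | nil => simp
  | cons a d' =>
    by_cases h : a = x <;> simp [h]

theorem go_eq_drop (d t : List Int) :
    ∀ (s : List Int) (i j : Nat),
      serverOrdersRecursiveAltGo d t s i j =
        serverOrdersRecursive (d.drop i) (t.drop j) s := by
  intro s
  induction s with
  | nil => intro i j; simp [serverOrdersRecursiveAltGo, serverOrdersRecursive]
  | cons x rest ih =>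
    intro i j
    rw [serverOrdersRecursiveAltGo, serverOrdersRecursive, cond_eq_head, cond_eq_head]
    rw [List.head?_drop, List.head?_drop]
    by_cases h1 : d[i]? = some x
    · simp [h1, ih, List.drop_drop]
    · by_cases h2 : t[j]? = some x <;>
        simp [h1, h2, ih, List.drop_drop]

-- ===== VERDICT (by name: the statement is the Claim_ definition above) =====
theorem serverOrdersRecursive_spec : Claim_equal_serverOrdersRecursive := by
  intro d t s _
  unfold Spec_serverOrdersRecursive serverOrdersRecursive_alt
  rw [go_eq_drop]
  simp
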